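-- pv_equiv track=rewrite | github.com/BHariKrishnaReddy/Python-DSA | Python topics/ArrayProblmes-DSAsheet/ChocolaeDistribution.py | min_diff_chocolates
-- ===== SOURCE A (Python) =====
-- def min_diff_chocolates(packets, m):
--     if len(packets) < m:
--         return -1
--
--     min_diff = float('inf')
--
--     curr_sum,n = sum(packets[:m]),len(packets)
--     min_val,max_val = min(packets[:m]),max(packets[:m])
--     min_diff = min(min_diff, max_val - min_val)
--
--     # Slide the window and update the minimum difference
--     for i in range(m, n):
--         curr_sum -= packets[i - m]
--         if packets[i - m] == min_val:
--             min_val = min(packets[i - m + 1:i + 1])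
--         elif packets[i - m] == max_val:
--             max_val = max(packets[i - m + 1:i + 1])
--         curr_sum += packets[i]
--         min_val = min(min_val, packets[i])
--         max_val = max(max_val, packets[i])
--         min_diff = min(min_diff, max_val - min_val)
--
--     return min_diff
-- ===== SOURCE B (Python) =====
-- def min_diff_chocolates(packets, m):
--     if len(packets) < m:
--         return -1
--     windows = [packets[i - m:i] for i in range(m, len(packets) + 1)]
--     return min(max(w) - min(w) for w in windows)
-- ===== Notes on version B (the rewrite author's own statement) =====
-- stated objective: simpler
-- what changed: A maintains running min/max across the sliding window, rescanning the window only when the evicted element was the current min or max (plus a dead running sum); B drops all incremental state and directly takes the min over all size-m windows of max(window)-min(window) via a comprehension.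
import Mathlib
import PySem

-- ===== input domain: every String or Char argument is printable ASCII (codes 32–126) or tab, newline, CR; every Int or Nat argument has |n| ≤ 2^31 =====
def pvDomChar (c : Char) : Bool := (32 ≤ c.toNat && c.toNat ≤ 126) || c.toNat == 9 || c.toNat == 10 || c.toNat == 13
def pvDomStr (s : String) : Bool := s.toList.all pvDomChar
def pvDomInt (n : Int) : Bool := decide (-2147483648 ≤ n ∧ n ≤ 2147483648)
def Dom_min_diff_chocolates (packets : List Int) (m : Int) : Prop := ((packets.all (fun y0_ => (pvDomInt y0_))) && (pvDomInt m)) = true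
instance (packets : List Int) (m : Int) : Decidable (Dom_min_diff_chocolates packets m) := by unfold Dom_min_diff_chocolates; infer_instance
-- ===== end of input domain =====

-- B replaces A's incremental sliding min/max (with eviction rescans and a dead running sum) by a
-- direct min over per-window (max - min); objective: simpler, same asymptotic cost.


-- ===== PORT A =====
-- A-side helper: the body of A's for-loop (state = (curr_sum, min_val, max_val, min_diff)).
def aStep (packets : List Int) (m : Int) (s : Int × Int × Int × Int) (i : Int) : Int × Int × Int × Int :=
  let left := PySem.List.pyGetD packets (i - m) 0
  let cs1 := s.1 - left
  let mv1 : Int × Int :=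
    if left = s.2.1 then
      ((PySem.List.min? (PySem.List.slice packets (some (i - m + 1)) (some (i + 1))) (fun y => y)).getD 0, s.2.2.1)
    else if left = s.2.2.1 then
      (s.2.1, (PySem.List.max? (PySem.List.slice packets (some (i - m + 1)) (some (i + 1))) (fun y => y)).getD 0)
    else (s.2.1, s.2.2.1)
  let x := PySem.List.pyGetD packets i 0
  let cs2 := cs1 + x
  let minv := min mv1.1 x
  let maxv := max mv1.2 x
  (cs2, minv, maxv, min s.2.2.2 (maxv - minv))

def min_diff_chocolates (packets : List Int) (m : Int) : Int :=
  if (packets.length : Int) < m then -1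
  else
    let n : Int := packets.length
    let firstWin := PySem.List.slice packets none (some m)
    let currSum := firstWin.sum
    let minVal := (PySem.List.min? firstWin (fun y => y)).getD 0
    let maxVal := (PySem.List.max? firstWin (fun y => y)).getD 0
    -- Python's float('inf') sentinel: min(inf, max_val - min_val) = max_val - min_val (an int)
    let minDiff := maxVal - minVal
    let final := (PySem.List.pyRange m n 1).foldl (aStep packets m) (currSum, minVal, maxVal, minDiff)
    final.2.2.2

-- ===== PORT B =====
def min_diff_chocolates_alt (packets : List Int) (m : Int) : Int :=
  if (packets.length : Int) < m then -1
  else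
    let windows := (PySem.List.pyRange m ((packets.length : Int) + 1) 1).map
      (fun i => PySem.List.slice packets (some (i - m)) (some i))
    let diffs := windows.map
      (fun w => (PySem.List.max? w (fun y => y)).getD 0 - (PySem.List.min? w (fun y => y)).getD 0)
    (PySem.List.min? diffs (fun y => y)).getD 0

-- ===== PRECONDITION & SPEC =====
-- Pre_ excludes only m ≤ 0, on which Python A always raises (ValueError on min([]) for m = 0,
-- IndexError/ValueError from negative-slice bookkeeping for m < 0); A never returns a value there.
def Pre_min_diff_chocolates (packets : List Int) (m : Int) : Prop := 1 ≤ m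
instance (packets : List Int) (m : Int) : Decidable (Pre_min_diff_chocolates packets m) := by unfold Pre_min_diff_chocolates; infer_instance
def pvWitness_min_diff_chocolates : List Int × Int := ([7, 3, 2, 4, 9, 12, 56], 3)
def Spec_min_diff_chocolates (packets : List Int) (m : Int) (out : Int) : Prop := out = min_diff_chocolates_alt packets m
instance (packets : List Int) (m : Int) (out : Int) : Decidable (Spec_min_diff_chocolates packets m out) := by unfold Spec_min_diff_chocolates; infer_instance

-- ===== CLAIM (what is proved, stated in full; the proofs are below) =====
def Claim_equal_min_diff_chocolates : Prop := ∀ (packets : List Int) (m : Int), Dom_min_diff_chocolates packets m → Pre_min_diff_chocolates packets m → Spec_min_diff_chocolates packets m (min_diff_chocolates packets m)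

-- ===== LEMMAS AND PROOFS =====

-- min/max of a nonempty list, as the ports compute it
def pvMinD (l : List Int) : Int := (PySem.List.min? l (fun y => y)).getD 0
def pvMaxD (l : List Int) : Int := (PySem.List.max? l (fun y => y)).getD 0
-- the window of length mN starting at j
def pvWin (p : List Int) (mN j : Nat) : List Int := (p.drop j).take mN
-- the difference of window j
def pvDj (p : List Int) (mN j : Nat) : Int := pvMaxD (pvWin p mN j) - pvMinD (pvWin p mN j)
-- prefix minimum of the window differences
def pvPM (p : List Int) (mN : Nat) : Nat → Int
  | 0 => pvDj p mN 0
  | (K+1) => min (pvPM p mN K) (pvDj p mN (K+1))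

lemma pv_foldl_min_assoc (t : List Int) : ∀ x y : Int, t.foldl min (min x y) = min x (t.foldl min y) := by
  induction t with
  | nil => intro x y; rfl
  | cons h t ih =>
    intro x y
    simp only [List.foldl_cons, min_assoc]
    exact ih x (min y h)

lemma pv_foldl_max_assoc (t : List Int) : ∀ x y : Int, t.foldl max (max x y) = max x (t.foldl max y) := by
  induction t with
  | nil => intro x y; rfl
  | cons h t ih =>
    intro x y
    simp only [List.foldl_cons, max_assoc]
    exact ih x (max y h)

lemma pvMinD_cons (x : Int) (t : List Int) (ht : t ≠ []) : pvMinD (x :: t) = min x (pvMinD t) := by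
  obtain ⟨h, t', rfl⟩ := List.exists_cons_of_ne_nil ht
  simp only [pvMinD, PySem.List.min?_id_cons, Option.getD_some, List.foldl_cons]
  exact pv_foldl_min_assoc t' x h

lemma pvMaxD_cons (x : Int) (t : List Int) (ht : t ≠ []) : pvMaxD (x :: t) = max x (pvMaxD t) := by
  obtain ⟨h, t', rfl⟩ := List.exists_cons_of_ne_nil ht
  simp only [pvMaxD, PySem.List.max?_id_cons, Option.getD_some, List.foldl_cons]
  exact pv_foldl_max_assoc t' x h

lemma pvMinD_snoc (l : List Int) (x : Int) (hl : l ≠ []) : pvMinD (l ++ [x]) = min (pvMinD l) x := by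
  obtain ⟨h, t, rfl⟩ := List.exists_cons_of_ne_nil hl
  simp only [pvMinD, List.cons_append, PySem.List.min?_id_cons, Option.getD_some, List.foldl_append,
    List.foldl_cons, List.foldl_nil]

lemma pvMaxD_snoc (l : List Int) (x : Int) (hl : l ≠ []) : pvMaxD (l ++ [x]) = max (pvMaxD l) x := by
  obtain ⟨h, t, rfl⟩ := List.exists_cons_of_ne_nil hl
  simp only [pvMaxD, List.cons_append, PySem.List.max?_id_cons, Option.getD_some, List.foldl_append,
    List.foldl_cons, List.foldl_nil]

lemma pvMinD_le (l : List Int) (a : Int) (ha : a ∈ l) : pvMinD l ≤ a := by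
  rcases hmv : PySem.List.min? l (fun y : Int => y) with _ | mv
  · exact absurd ((PySem.List.min?_eq_none_iff l _).mp hmv) (List.ne_nil_of_mem ha)
  · have := PySem.List.min?_isMin hmv a ha
    simpa [pvMinD, hmv] using this

lemma pvMaxD_ge (l : List Int) (a : Int) (ha : a ∈ l) : a ≤ pvMaxD l := by
  rcases hmv : PySem.List.max? l (fun y : Int => y) with _ | mv
  · exact absurd ((PySem.List.max?_eq_none_iff l _).mp hmv) (List.ne_nil_of_mem ha)
  · have := PySem.List.max?_isMax hmv a ha
    simpa [pvMaxD, hmv] using this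

lemma pvMaxD_mem (l : List Int) (hl : l ≠ []) : pvMaxD l ∈ l := by
  rcases hmv : PySem.List.max? l (fun y : Int => y) with _ | mv
  · exact absurd ((PySem.List.max?_eq_none_iff l _).mp hmv) hl
  · have := PySem.List.max?_mem hmv
    simpa [pvMaxD, hmv] using this

lemma pvWin_ne_nil (p : List Int) (mN j : Nat) (h1 : 1 ≤ mN) (h2 : j < p.length) : pvWin p mN j ≠ [] := by
  have : (pvWin p mN j).length = min mN (p.length - j) := by
    simp [pvWin]
  intro hc
  rw [hc] at this
  simp at this
  omega

lemma pvWin_cons (p : List Int) (mN j : Nat) (h1 : 1 ≤ mN) (h : j < p.length) :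
    pvWin p mN j = p[j] :: pvWin p (mN - 1) (j + 1) := by
  unfold pvWin
  obtain ⟨mN', rfl⟩ : ∃ k, mN = k + 1 := ⟨mN - 1, by omega⟩
  rw [List.drop_eq_getElem_cons h, List.take_succ_cons]
  simp

lemma pvWin_snoc (p : List Int) (mN j : Nat) (h1 : 1 ≤ mN) (h : j + mN < p.length) :
    pvWin p mN (j + 1) = pvWin p (mN - 1) (j + 1) ++ [p[j + mN]] := by
  unfold pvWin
  obtain ⟨mN', rfl⟩ : ∃ k, mN = k + 1 := ⟨mN - 1, by omega⟩
  have hlen : mN' < (p.drop (j + 1)).length := by simp; omega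
  rw [List.take_add_one, List.getElem?_eq_getElem hlen]
  have e : j + 1 + mN' = j + (mN' + 1) := by omega
  simp [List.getElem_drop, e]

lemma pvPM_one (p : List Int) : ∀ K : Nat, K < p.length → pvPM p 1 K = 0 := by
  intro K
  induction K with
  | zero =>
    intro h
    have : pvWin p 1 0 = [p[0]] := by
      rw [pvWin_cons p 1 0 (by omega) h]; simp [pvWin]
    simp [pvPM, pvDj, this, pvMinD, pvMaxD, PySem.List.min?, PySem.List.max?]
  | succ K ih =>
    intro h
    have hW : pvWin p 1 (K+1) = [p[K+1]] := by
      rw [pvWin_cons p 1 (K+1) (by omega) h]; simp [pvWin]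
    have : pvDj p 1 (K+1) = 0 := by
      simp [pvDj, hW, pvMinD, pvMaxD, PySem.List.min?, PySem.List.max?]
    simp [pvPM, this, ih (by omega)]

-- B's value is the prefix minimum of all window differences
lemma pvB_eq_pm (p : List Int) (mN : Nat) : ∀ K : Nat,
    pvMinD (((List.range (K + 1)).map (pvDj p mN))) = pvPM p mN K := by
  intro K
  induction K with
  | zero => simp [pvPM, pvMinD, PySem.List.min?]
  | succ K ih =>
    rw [List.range_succ, List.map_append]
    simp only [List.map_cons, List.map_nil]
    rw [pvMinD_snoc _ _ (by simp)]
    simp [pvPM, ih]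

-- One loop iteration of A preserves the invariant.
lemma aStep_inv (p : List Int) (m : Int) (mN : Nat) (hm : m = (mN : Int)) (h1 : 1 ≤ mN)
    (K : Nat) (hK : K + mN < p.length) (s : Int × Int × Int × Int)
    (hmin : s.2.1 = pvMinD (pvWin p mN K))
    (hmax : 2 ≤ mN → s.2.2.1 = pvMaxD (pvWin p mN K))
    (hmd : s.2.2.2 = pvPM p mN K) :
    (aStep p m s (m + (K : Int))).2.1 = pvMinD (pvWin p mN (K + 1)) ∧
    (2 ≤ mN → (aStep p m s (m + (K : Int))).2.2.1 = pvMaxD (pvWin p mN (K + 1))) ∧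
    (aStep p m s (m + (K : Int))).2.2.2 = pvPM p mN (K + 1) := by
  have hKlt : K < p.length := by omega
  have hKm : K + mN < p.length := hK
  -- the evicted element and the entering element
  have hleft : PySem.List.pyGetD p ((m + (K : Int)) - m) 0 = p[K] := by
    have : (m + (K : Int)) - m = (K : Int) := by ring
    rw [this, PySem.List.pyGetD_natCast]
    exact List.getD_eq_getElem p 0 hKlt
  have hx : PySem.List.pyGetD p (m + (K : Int)) 0 = p[K + mN] := by
    have h' : m + (K : Int) = ((K + mN : Nat) : Int) := by rw [hm]; push_cast; ring
    rw [h', PySem.List.pyGetD_natCast]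
    exact List.getD_eq_getElem p 0 hKm
  -- the rescanned slice is exactly window K+1
  have hslice : PySem.List.slice p (some ((m + (K : Int)) - m + 1)) (some (m + (K : Int) + 1))
      = pvWin p mN (K + 1) := by
    have e1 : (m + (K : Int)) - m + 1 = ((K + 1 : Nat) : Int) := by push_cast; ring
    have e2 : m + (K : Int) + 1 = ((K + 1 + mN : Nat) : Int) := by rw [hm]; push_cast; ring
    rw [e1, e2, PySem.List.slice_natCast]
    unfold pvWin
    congr 1
    omega
  -- window decompositions
  set T := pvWin p (mN - 1) (K + 1) with hT
  have hWK : pvWin p mN K = p[K] :: T := pvWin_cons p mN K h1 hKlt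
  have hWK1 : pvWin p mN (K + 1) = T ++ [p[K + mN]] := pvWin_snoc p mN K h1 hKm
  have hxmem : p[K + mN] ∈ pvWin p mN (K + 1) := by rw [hWK1]; simp
  by_cases h2 : 2 ≤ mN
  · -- general case: the tail T is nonempty
    have hTne : T ≠ [] := pvWin_ne_nil p (mN - 1) (K + 1) (by omega) (by omega)
    have hminWK : pvMinD (pvWin p mN K) = min p[K] (pvMinD T) := by rw [hWK, pvMinD_cons _ _ hTne]
    have hmaxWK : pvMaxD (pvWin p mN K) = max p[K] (pvMaxD T) := by rw [hWK, pvMaxD_cons _ _ hTne]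
    have hminW1 : pvMinD (pvWin p mN (K + 1)) = min (pvMinD T) p[K + mN] := by
      rw [hWK1, pvMinD_snoc _ _ hTne]
    have hmaxW1 : pvMaxD (pvWin p mN (K + 1)) = max (pvMaxD T) p[K + mN] := by
      rw [hWK1, pvMaxD_snoc _ _ hTne]
    by_cases hb1 : p[K] = s.2.1
    · -- evicted element was the window minimum: min rescanned over window K+1
      have hnewmin : min (pvMinD (pvWin p mN (K + 1))) p[K + mN] = pvMinD (pvWin p mN (K + 1)) :=
        min_eq_left (pvMinD_le _ _ hxmem)
      have hmaxT : max p[K] (pvMaxD T) = pvMaxD T := by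
        apply max_eq_right
        calc p[K] = pvMinD (pvWin p mN K) := by rw [← hmin, hb1]
          _ ≤ pvMaxD T := pvMinD_le _ _ (by rw [hWK]; exact List.mem_cons_of_mem _ (pvMaxD_mem T hTne))
      simp only [aStep, hleft, hx, hslice]
      rw [if_pos hb1]
      refine ⟨?_, fun _ => ?_, ?_⟩
      · exact hnewmin
      · show max s.2.2.1 p[K + mN] = pvMaxD (pvWin p mN (K + 1))
        rw [hmax h2, hmaxWK, hmaxT, hmaxW1]
      · show min s.2.2.2 (max s.2.2.1 p[K + mN] - min (pvMinD (pvWin p mN (K + 1))) p[K + mN])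
            = pvPM p mN (K + 1)
        rw [hnewmin, hmd, hmax h2, hmaxWK, hmaxT, ← hmaxW1]
        rfl
    · -- evicted element was not the minimum: the old min survives in T
      have hminT : min p[K] (pvMinD T) = pvMinD T := by
        rcases min_choice p[K] (pvMinD T) with h | h
        · exact absurd (by rw [hmin, hminWK, h]) hb1
        · exact h
      have hnewmin : min s.2.1 p[K + mN] = pvMinD (pvWin p mN (K + 1)) := by
        rw [hmin, hminWK, hminT, hminW1]
      by_cases hb2 : p[K] = s.2.2.1
      · -- evicted element was the window maximum: max rescanned over window K+1
        have hnewmax : max (pvMaxD (pvWin p mN (K + 1))) p[K + mN] = pvMaxD (pvWin p mN (K + 1)) :=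
          max_eq_left (pvMaxD_ge _ _ hxmem)
        simp only [aStep, hleft, hx, hslice]
        rw [if_neg hb1, if_pos hb2]
        refine ⟨?_, fun _ => ?_, ?_⟩
        · exact hnewmin
        · exact hnewmax
        · show min s.2.2.2 (max (pvMaxD (pvWin p mN (K + 1))) p[K + mN] - min s.2.1 p[K + mN])
              = pvPM p mN (K + 1)
          rw [hmd, hnewmax, hnewmin]
          rfl
      · -- evicted element was neither: both survive
        have hmaxT : max p[K] (pvMaxD T) = pvMaxD T := by
          rcases max_choice p[K] (pvMaxD T) with h | h
          · exact absurd (by rw [hmax h2, hmaxWK, h]) hb2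
          · exact h
        have hnewmax : max s.2.2.1 p[K + mN] = pvMaxD (pvWin p mN (K + 1)) := by
          rw [hmax h2, hmaxWK, hmaxT, hmaxW1]
        simp only [aStep, hleft, hx, hslice]
        rw [if_neg hb1, if_neg hb2]
        refine ⟨?_, fun _ => ?_, ?_⟩
        · exact hnewmin
        · exact hnewmax
        · show min s.2.2.2 (max s.2.2.1 p[K + mN] - min s.2.1 p[K + mN]) = pvPM p mN (K + 1)
          rw [hmd, hnewmax, hnewmin]
          rfl
  · -- mN = 1: the window is a singleton, the first branch always fires, min_diff stays 0
    have hm1 : mN = 1 := by omega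
    subst hm1
    have hTnil : T = [] := by simp [hT, pvWin]
    have hWKs : pvWin p 1 K = [p[K]] := by rw [hWK, hTnil]
    have hWK1s : pvWin p 1 (K + 1) = [p[K + 1]] := by rw [hWK1, hTnil]; simp
    have hminWK : pvMinD (pvWin p 1 K) = p[K] := by
      simp [hWKs, pvMinD, PySem.List.min?]
    have hminW1 : pvMinD (pvWin p 1 (K + 1)) = p[K + 1] := by
      simp [hWK1s, pvMinD, PySem.List.min?]
    have hb1 : p[K] = s.2.1 := by rw [hmin, hminWK]
    simp only [aStep, hleft, hx, hslice]
    rw [if_pos hb1]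
    refine ⟨?_, fun hc => absurd hc (by omega), ?_⟩
    · show min (pvMinD (pvWin p 1 (K + 1))) p[K + 1] = pvMinD (pvWin p 1 (K + 1))
      rw [hminW1, min_self]
    · show min s.2.2.2 (max s.2.2.1 p[K + 1] - min (pvMinD (pvWin p 1 (K + 1))) p[K + 1])
          = pvPM p 1 (K + 1)
      rw [hminW1, min_self, hmd, pvPM_one p K (by omega), pvPM_one p (K + 1) (by omega)]
      exact min_eq_left (sub_nonneg.mpr (le_max_right _ _))

-- A's loop maintains the invariant (first state component, the dead running sum, is arbitrary).
lemma aLoop_inv (p : List Int) (m : Int) (mN : Nat) (hm : m = (mN : Int)) (h1 : 1 ≤ mN)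
    (c0 : Int) : ∀ K : Nat, K + mN ≤ p.length →
    ((((List.range K).map (fun k : Nat => m + (k : Int))).foldl (aStep p m)
        (c0, pvMinD (pvWin p mN 0), pvMaxD (pvWin p mN 0), pvDj p mN 0)).2.1
        = pvMinD (pvWin p mN K)) ∧
    (2 ≤ mN → (((List.range K).map (fun k : Nat => m + (k : Int))).foldl (aStep p m)
        (c0, pvMinD (pvWin p mN 0), pvMaxD (pvWin p mN 0), pvDj p mN 0)).2.2.1
        = pvMaxD (pvWin p mN K)) ∧
    ((((List.range K).map (fun k : Nat => m + (k : Int))).foldl (aStep p m)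
        (c0, pvMinD (pvWin p mN 0), pvMaxD (pvWin p mN 0), pvDj p mN 0)).2.2.2
        = pvPM p mN K) := by
  intro K
  induction K with
  | zero =>
    intro _
    exact ⟨rfl, fun _ => rfl, rfl⟩
  | succ K ih =>
    intro hK
    obtain ⟨i1, i2, i3⟩ := ih (by omega)
    rw [List.range_succ, List.map_append, List.foldl_append]
    simp only [List.map_cons, List.map_nil, List.foldl_cons, List.foldl_nil]
    exact aStep_inv p m mN hm h1 K (by omega) _ i1 i2 i3

-- ===== VERDICT (by name: the statement is the Claim_ definition above) =====
theorem min_diff_chocolates_spec : Claim_equal_min_diff_chocolates := by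
  intro p m _ hpre
  unfold Spec_min_diff_chocolates min_diff_chocolates min_diff_chocolates_alt
  by_cases hlt : (p.length : Int) < m
  · rw [if_pos hlt, if_pos hlt]
  · rw [if_neg hlt, if_neg hlt]
    have hpre' : (1 : Int) ≤ m := hpre
    set mN := m.toNat with hmN
    have hm : m = (mN : Int) := by omega
    have h1 : 1 ≤ mN := by omega
    have hmlen : mN ≤ p.length := by omega
    set K := p.length - mN with hKdef
    -- first window
    have hfw : PySem.List.slice p none (some m) = pvWin p mN 0 := by
      rw [hm, PySem.List.slice_to_natCast]
      simp [pvWin]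
    -- A's loop range
    have hrange : PySem.List.pyRange m (p.length : Int) 1
        = (List.range K).map (fun k : Nat => m + (k : Int)) := by
      rw [PySem.List.pyRange_one]
      congr 1
      rw [hm]
      congr 1
      omega
    -- B's window list
    have hbrange : PySem.List.pyRange m ((p.length : Int) + 1) 1
        = (List.range (K + 1)).map (fun k : Nat => m + (k : Int)) := by
      rw [PySem.List.pyRange_one]
      congr 1
      rw [hm]
      congr 1
      omega
    have hbwin : ∀ k : Nat, PySem.List.slice p (some (m + (k : Int) - m)) (some (m + (k : Int)))
        = pvWin p mN k := by
      intro k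
      have e1 : m + (k : Int) - m = ((k : Nat) : Int) := by ring
      have e2 : m + (k : Int) = ((k + mN : Nat) : Int) := by rw [hm]; push_cast; ring
      rw [e1, e2, PySem.List.slice_natCast]
      unfold pvWin
      congr 1
      omega
    -- B = prefix min of window differences
    have hB : (PySem.List.min? (((PySem.List.pyRange m ((p.length : Int) + 1) 1).map
          (fun i => PySem.List.slice p (some (i - m)) (some i))).map
          (fun w => (PySem.List.max? w (fun y => y)).getD 0 - (PySem.List.min? w (fun y => y)).getD 0))
          (fun y => y)).getD 0 = pvPM p mN K := by
      rw [hbrange, List.map_map, List.map_map]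
      have : (((fun w => (PySem.List.max? w (fun y : Int => y)).getD 0 -
            (PySem.List.min? w (fun y : Int => y)).getD 0) ∘
            (fun i => PySem.List.slice p (some (i - m)) (some i))) ∘ (fun k : Nat => m + (k : Int)))
          = pvDj p mN := by
        funext k
        simp only [Function.comp, pvDj, pvMaxD, pvMinD, hbwin k]
      rw [this]
      exact pvB_eq_pm p mN K
    -- A = the same prefix min, via the loop invariant
    have hA := (aLoop_inv p m mN hm h1 (pvWin p mN 0).sum K (by omega)).2.2
    simp only [hfw, hrange]
    rw [hB]
    show ((((List.range K).map (fun k : Nat => m + (k : Int))).foldl (aStep p m)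
        ((pvWin p mN 0).sum, pvMinD (pvWin p mN 0), pvMaxD (pvWin p mN 0),
          pvMaxD (pvWin p mN 0) - pvMinD (pvWin p mN 0))).2.2.2) = pvPM p mN K
    have e0 : pvMaxD (pvWin p mN 0) - pvMinD (pvWin p mN 0) = pvDj p mN 0 := rfl
    rw [e0]
    exact hA
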